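-- pv_equiv track=rewrite | github.com/puyopop/atcoder-workspace | abc166/E/main.py | solve
-- ===== SOURCE A (Python) =====
-- def solve(N, A):
--     from collections import defaultdict
--     B = defaultdict(int)
--     ans = 0
--     for i, a in enumerate(A, 1):
--         ans += B[a-i]
--         B[-a-i] += 1
--     return ans
-- ===== SOURCE B (Python) =====
-- def solve(N, A):
--     from collections import defaultdict
--     # Offline index approach: group every position j by its R-value j - A_j,
--     # then for each position i count indexed positions j with j - A_j == A_i + i and i < j.
--     Rg = defaultdict(list)
--     for j, a in enumerate(A, 1):
--         Rg[j - a].append(j)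
--     return sum(sum(1 for j in Rg.get(i + a, ()) if i < j)
--                for i, a in enumerate(A, 1))
-- ===== Notes on version B (the rewrite author's own statement) =====
-- stated objective: alternative
-- what changed: Replaces the streaming query-then-insert defaultdict counter by an offline two-phase method: first build an index mapping each value j-A_j to the list of positions j, then for each position i count indexed positions j with j-A_j = A_i+i and i<j by explicit position comparison.
import Mathlib
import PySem

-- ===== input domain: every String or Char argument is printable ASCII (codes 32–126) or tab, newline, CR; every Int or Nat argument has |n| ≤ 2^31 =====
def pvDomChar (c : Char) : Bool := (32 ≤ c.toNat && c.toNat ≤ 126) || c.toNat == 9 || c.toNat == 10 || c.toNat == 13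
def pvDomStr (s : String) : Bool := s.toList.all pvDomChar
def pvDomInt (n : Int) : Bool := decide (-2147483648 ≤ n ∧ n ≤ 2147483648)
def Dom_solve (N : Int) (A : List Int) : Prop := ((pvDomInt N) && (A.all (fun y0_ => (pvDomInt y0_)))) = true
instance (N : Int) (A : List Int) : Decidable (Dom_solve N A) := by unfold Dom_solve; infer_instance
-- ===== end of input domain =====

-- B changes the algorithm (offline position index instead of A's streaming counter), same values; objective: alternative.

-- ===== PORT A =====
-- the for-loop over enumerate(A, 1): state = (defaultdict B, ans); defaultdict's
-- implicit zero-entry on read (`ans += B[a-i]`) is ported as the value-preserving insert.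
def solveGo : List (Int × Int) → PySem.Dict Int Int → Int → Int
  | [], _, ans => ans
  | (i, a) :: rest, B, ans =>
    let ans' := ans + B.getD (a - i) 0
    let B1 := B.insert (a - i) (B.getD (a - i) 0)
    let B2 := B1.insert (-a - i) (B1.getD (-a - i) 0 + 1)
    solveGo rest B2 ans'

def solve (N : Int) (A : List Int) : Int :=
  solveGo (PySem.List.enumerate A 1) PySem.Dict.empty 0

-- ===== PORT B =====
def solve_alt (N : Int) (A : List Int) : Int :=
  let E := PySem.List.enumerate A 1
  let Rg := E.foldl (fun d p => d.insert (p.1 - p.2) (d.getD (p.1 - p.2) [] ++ [p.1]))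
              (PySem.Dict.empty : PySem.Dict Int (List Int))
  (E.map (fun p => (((Rg.getD (p.1 + p.2) []).countP (fun j => decide (p.1 < j)) : Nat) : Int))).sum

-- ===== PRECONDITION & SPEC =====
def Spec_solve (N : Int) (A : List Int) (out : Int) : Prop := out = solve_alt N A
instance (N : Int) (A : List Int) (out : Int) : Decidable (Spec_solve N A out) := by unfold Spec_solve; infer_instance

-- ===== CLAIM (what is proved, stated in full; the proofs are below) =====
def Claim_equal_solve : Prop := ∀ (N : Int) (A : List Int), Dom_solve N A → Spec_solve N A (solve N A)

-- ===== LEMMAS AND PROOFS =====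

-- A's loop with the dict abstracted to its lookup function
def gfun : List (Int × Int) → (Int → Int) → Int
  | [], _ => 0
  | (i, a) :: r, f => f (a - i) + gfun r (fun v => f v + if v = -a - i then 1 else 0)

lemma gfun_congr (E : List (Int × Int)) (f g : Int → Int) (h : ∀ v, f v = g v) :
    gfun E f = gfun E g := by
  rw [funext h]

lemma solveGo_eq : ∀ (E : List (Int × Int)) (B : PySem.Dict Int Int) (ans : Int),
    solveGo E B ans = ans + gfun E (fun v => B.getD v 0) := by
  intro E
  induction E with
  | nil => intro B ans; simp [solveGo, gfun]
  | cons p r ih =>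
    intro B ans
    obtain ⟨i, a⟩ := p
    simp only [solveGo, gfun]
    rw [ih]
    have hB1 : ∀ v, (B.insert (a - i) (B.getD (a - i) 0)).getD v 0 = B.getD v 0 := by
      intro v
      rw [PySem.Dict.getD_insert]
      split_ifs with hv
      · rw [hv]
      · rfl
    have h : ∀ v, ((B.insert (a - i) (B.getD (a - i) 0)).insert (-a - i)
        ((B.insert (a - i) (B.getD (a - i) 0)).getD (-a - i) 0 + 1)).getD v 0
        = B.getD v 0 + if v = -a - i then 1 else 0 := by
      intro v
      rw [PySem.Dict.getD_insert, hB1, hB1]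
      split_ifs with hv
      · rw [hv]
      · ring
    rw [gfun_congr r _ _ h]
    ring

lemma gfun_delta : ∀ (E : List (Int × Int)) (f : Int → Int) (k : Int),
    gfun E (fun v => f v + if v = k then 1 else 0)
      = gfun E f + (E.countP (fun p => decide (p.2 - p.1 = k)) : Int) := by
  intro E
  induction E with
  | nil => intro f k; simp [gfun]
  | cons p r ih =>
    intro f k
    obtain ⟨j, b⟩ := p
    simp only [gfun, List.countP_cons]
    have hc : gfun r (fun v => (f v + if v = k then 1 else 0) + if v = -b - j then 1 else 0)
        = gfun r (fun v => (f v + if v = -b - j then 1 else 0) + if v = k then 1 else 0) := by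
      apply gfun_congr; intro v; ring
    rw [hc, ih (fun v => f v + if v = -b - j then 1 else 0) k]
    by_cases hbk : b - j = k <;> simp [hbk] <;> ring

-- A's closed form: for each element, the number of later elements whose query key matches
def pc : List (Int × Int) → Int
  | [] => 0
  | (i, a) :: r => (r.countP (fun p => decide (p.2 - p.1 = -a - i)) : Int) + pc r

lemma gfun_zero : ∀ (E : List (Int × Int)), gfun E (fun _ => 0) = pc E := by
  intro E
  induction E with
  | nil => rfl
  | cons p r ih =>
    obtain ⟨i, a⟩ := p
    simp only [gfun, pc]
    rw [gfun_delta r (fun _ => 0) (-a - i), ih]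
    ring

-- B's grouping dict, characterised
lemma rg_getD : ∀ (E : List (Int × Int)) (d : PySem.Dict Int (List Int)) (v : Int),
    (E.foldl (fun d p => d.insert (p.1 - p.2) (d.getD (p.1 - p.2) [] ++ [p.1])) d).getD v []
      = d.getD v [] ++ (E.filter (fun p => decide (p.1 - p.2 = v))).map Prod.fst := by
  intro E
  induction E with
  | nil => intro d v; simp
  | cons p r ih =>
    intro d v
    obtain ⟨j, b⟩ := p
    simp only [List.foldl_cons, List.filter_cons]
    rw [ih]
    rw [PySem.Dict.getD_insert]
    by_cases hv : v = j - b
    · subst hv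
      simp [List.append_assoc]
    · rw [if_neg hv]
      have hne : ¬ (j - b = v) := fun h => hv h.symm
      simp [hne]

lemma count_filter_map : ∀ (E : List (Int × Int)) (v i : Int),
    ((E.filter (fun p => decide (p.1 - p.2 = v))).map Prod.fst).countP (fun j => decide (i < j))
      = E.countP (fun p => decide (p.1 - p.2 = v ∧ i < p.1)) := by
  intro E v i
  rw [List.countP_map, List.countP_filter]
  apply List.countP_congr
  intro p _
  simp [Function.comp, and_comm]

-- the double count: positions in an enumerated list are pairwise increasing
lemma enumerate_first_lt : ∀ (A : List Int) (k : Int),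
    (PySem.List.enumerate A k).Pairwise (fun p q => p.1 < q.1) := by
  intro A
  induction A with
  | nil => intro k; rw [PySem.List.enumerate_nil]; exact List.Pairwise.nil
  | cons a r ih =>
    intro k
    rw [PySem.List.enumerate_cons]
    constructor
    · intro q hq
      have : q.1 ∈ (PySem.List.enumerate r (k+1)).map (·.1) := List.mem_map_of_mem hq
      rw [PySem.List.map_fst_enumerate, PySem.List.mem_pyRange_one] at this
      omega
    · exact ih (k+1)

lemma pc_eq_bsum : ∀ (E : List (Int × Int)), E.Pairwise (fun p q => p.1 < q.1) →
    pc E = (E.map (fun p =>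
      ((E.countP (fun q => decide (q.1 - q.2 = p.1 + p.2 ∧ p.1 < q.1)) : Nat) : Int))).sum := by
  intro E
  induction E with
  | nil => intro _; rfl
  | cons p r ih =>
    intro hpw
    obtain ⟨i, a⟩ := p
    rw [List.pairwise_cons] at hpw
    obtain ⟨hlt, hpw⟩ := hpw
    simp only [pc, List.map_cons, List.sum_cons]
    rw [List.countP_cons]
    have hhead : (decide ((i : Int) - a = i + a ∧ i < i)) = false := by
      simp only [decide_eq_false_iff_not, not_and]
      intro _
      exact lt_irrefl i
    have h1 : r.countP (fun q => decide (q.1 - q.2 = i + a ∧ i < q.1))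
        = r.countP (fun p => decide (p.2 - p.1 = -a - i)) := by
      apply List.countP_congr
      intro q hq
      have hiq : i < q.1 := hlt q hq
      simp only [decide_eq_true_eq]
      constructor <;> intro h <;> omega
    have h2 : (r.map (fun p => ((((i, a) :: r).countP
          (fun q => decide (q.1 - q.2 = p.1 + p.2 ∧ p.1 < q.1)) : Nat) : Int))).sum
        = (r.map (fun p => ((r.countP
          (fun q => decide (q.1 - q.2 = p.1 + p.2 ∧ p.1 < q.1)) : Nat) : Int))).sum := by
      apply congrArg
      apply List.map_congr_left
      intro p hp
      have hip := hlt p hp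
      have hfalse : (decide ((i : Int) - a = p.1 + p.2 ∧ p.1 < i)) = false := by
        simp only [decide_eq_false_iff_not, not_and]
        intro _
        omega
      rw [List.countP_cons]
      simp only [hfalse, Bool.false_eq_true, if_false, Nat.add_zero]
    simp only [hhead, Bool.false_eq_true, if_false, Nat.add_zero]
    rw [h1, h2, ih hpw]

-- ===== VERDICT (by name: the statement is the Claim_ definition above) =====
theorem solve_spec : Claim_equal_solve := by
  intro N A _
  unfold Spec_solve solve solve_alt
  rw [solveGo_eq]
  have he : ∀ v : Int, (PySem.Dict.empty : PySem.Dict Int Int).getD v 0 = (fun _ : Int => (0:Int)) v := by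
    intro v; simp [PySem.Dict.getD_empty]
  rw [gfun_congr _ _ _ he, gfun_zero]
  rw [pc_eq_bsum _ (enumerate_first_lt A 1)]
  simp only [zero_add]
  apply congrArg
  apply List.map_congr_left
  intro p _
  rw [rg_getD, PySem.Dict.getD_empty, List.nil_append, count_filter_map]
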